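-- pv_equiv track=rewrite | github.com/maifujalam/k8s_vagrant | python-learning/c.py | dns_resolution
-- ===== SOURCE A (Python) =====
-- def dns_resolution(cache_size, cache_time, server_time, urls):
--     cache = {}  # Dictionary to store URL-IP mappings
--     time_taken = []  # List to store the time taken for each URL
--
--     for url in urls:
--         if url in cache:
--             # If URL is in the cache, fetch from cache and update time_taken
--             time_taken.append(cache_time)
--             cache[url] = 0  # Reset the time in cache for this URL
--         else:
--             # If URL is not in cache, fetch from server and update cache
--             time_taken.append(server_time)
--             if len(cache) == cache_size:
--                 # Remove the least recently used URL from cache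
--                 lru_url = min(cache, key=cache.get)
--                 del cache[lru_url]
--             cache[url] = 0  # Add the new URL to cache with time 0
--
--         # Increment time for all URLs in the cache
--         for key in cache:
--             cache[key] += 1
--
--     return time_taken
-- ===== SOURCE B (Python) =====
-- def dns_resolution(cache_size, cache_time, server_time, urls):
--     # One observation makes the counter dict unnecessary: every step resets the
--     # accessed URL's counter to 0, so the key with the minimal counter (the one
--     # A evicts) is always the URL accessed on the previous step.  Keep only the
--     # set of cached URLs and that previous URL.
--     cached = set()
--     prev = None
--     out = []
--     for url in urls:
--         if url in cached:
--             out.append(cache_time)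
--         else:
--             out.append(server_time)
--             if len(cached) == cache_size and prev is not None:
--                 cached.remove(prev)
--             cached.add(url)
--         prev = url
--     return out
-- ===== Notes on version B (the rewrite author's own statement) =====
-- stated objective: faster
-- what changed: B drops A's per-URL counter dict with its O(cache_size) min-scan and increment-all pass, keeping only the set of cached URLs plus the previously accessed URL (which is provably the key A's min-scan evicts), so each URL is one O(1) set operation. Pre_ excludes cache_size == 0 with nonempty urls, where A raises ValueError (min() of an empty dict).
import Mathlib
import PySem

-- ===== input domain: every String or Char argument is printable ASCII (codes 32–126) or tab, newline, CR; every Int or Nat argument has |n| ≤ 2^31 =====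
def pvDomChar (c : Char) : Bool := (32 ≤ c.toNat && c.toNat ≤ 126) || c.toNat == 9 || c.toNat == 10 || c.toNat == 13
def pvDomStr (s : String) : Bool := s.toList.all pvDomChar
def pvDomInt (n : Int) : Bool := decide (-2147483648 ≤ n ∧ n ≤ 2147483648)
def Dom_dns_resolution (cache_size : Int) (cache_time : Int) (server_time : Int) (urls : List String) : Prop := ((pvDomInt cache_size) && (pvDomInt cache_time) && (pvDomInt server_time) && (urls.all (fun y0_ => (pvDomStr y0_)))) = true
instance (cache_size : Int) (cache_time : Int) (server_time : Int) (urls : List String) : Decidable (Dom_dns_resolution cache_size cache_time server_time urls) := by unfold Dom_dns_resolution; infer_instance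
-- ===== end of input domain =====

-- B replaces A's per-URL counter dict and O(cache_size) min/increment scans by a
-- set of cached URLs plus the previously accessed URL (which is always the key A's
-- min-scan evicts): one O(1) step per URL instead of O(cache_size).

-- ===== PORT A =====
-- 'for key in cache: cache[key] += 1' — fold Dict.modify over a snapshot of the keys
-- (the loop never adds or removes keys, so the snapshot is exact).
def pvIncr (c : PySem.Dict String Int) : PySem.Dict String Int :=
  c.keys.foldl (fun d k => d.modify k 0 (· + 1)) c

def pvStepA (cache_size cache_time server_time : Int)
    (s : PySem.Dict String Int × List Int) (url : String) :
    PySem.Dict String Int × List Int :=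
  if s.1.contains url then
    (pvIncr (s.1.insert url 0), s.2 ++ [cache_time])
  else
    let c1 : PySem.Dict String Int :=
      if (s.1.size : Int) = cache_size then
        match PySem.List.min? s.1.keys (fun k => s.1.getD k 0) with
        | some lru => s.1.erase lru
        | none => s.1   -- min() of an empty dict: Python raises ValueError here; excluded by Pre_
      else s.1
    (pvIncr (c1.insert url 0), s.2 ++ [server_time])

def dns_resolution (cache_size : Int) (cache_time : Int) (server_time : Int) (urls : List String) : List Int :=
  (urls.foldl (pvStepA cache_size cache_time server_time) (PySem.Dict.empty, [])).2

-- ===== PORT B =====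
def pvStepB (cache_size cache_time server_time : Int)
    (s : PySem.Set String × Option String × List Int) (url : String) :
    PySem.Set String × Option String × List Int :=
  if PySem.Set.contains s.1 url then
    (s.1, some url, s.2.2 ++ [cache_time])
  else
    let cached1 : PySem.Set String :=
      if (PySem.Set.len s.1 = cache_size) then
        match s.2.1 with
        | some p => (PySem.Set.remove? s.1 p).getD s.1   -- prev is always cached: remove? never raises
        | none => s.1
      else s.1
    (PySem.Set.add cached1 url, some url, s.2.2 ++ [server_time])

def dns_resolution_alt (cache_size : Int) (cache_time : Int) (server_time : Int) (urls : List String) : List Int :=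
  (urls.foldl (pvStepB cache_size cache_time server_time) (PySem.Set.empty, none, [])).2.2

-- ===== PRECONDITION & SPEC =====
-- Pre_ excludes cache_size = 0 with a nonempty url list: on the very first (miss) step the
-- cache is empty and already 'full', and Python A raises ValueError on min() of an empty dict.
def Pre_dns_resolution (cache_size : Int) (cache_time : Int) (server_time : Int) (urls : List String) : Prop :=
  cache_size = 0 → urls = []
instance (cache_size : Int) (cache_time : Int) (server_time : Int) (urls : List String) : Decidable (Pre_dns_resolution cache_size cache_time server_time urls) := by unfold Pre_dns_resolution; infer_instance

def pvWitness_dns_resolution : Int × Int × Int × List String := (2, 1, 5, ["a", "b", "c", "a", "b"])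

def Spec_dns_resolution (cache_size : Int) (cache_time : Int) (server_time : Int) (urls : List String) (out : List Int) : Prop := out = dns_resolution_alt cache_size cache_time server_time urls
instance (cache_size : Int) (cache_time : Int) (server_time : Int) (urls : List String) (out : List Int) : Decidable (Spec_dns_resolution cache_size cache_time server_time urls out) := by unfold Spec_dns_resolution; infer_instance

-- ===== CLAIM (what is proved, stated in full; the proofs are below) =====
def Claim_equal_dns_resolution : Prop := ∀ (cache_size : Int) (cache_time : Int) (server_time : Int) (urls : List String), Dom_dns_resolution cache_size cache_time server_time urls → Pre_dns_resolution cache_size cache_time server_time urls → Spec_dns_resolution cache_size cache_time server_time urls (dns_resolution cache_size cache_time server_time urls)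

-- ===== LEMMAS AND PROOFS =====

-- The loop invariant tying A's state (counter dict c) to B's state (set s, previous url prev):
-- the dict's keys are exactly B's set (same list), they are distinct, and after any completed
-- step the just-accessed url prev has counter 1 while every other cached url has counter >= 2
-- (so prev is exactly the key A's min-scan picks).
def pvInv (c : PySem.Dict String Int) (s : PySem.Set String) (prev : Option String) : Prop :=
  c.keys = s ∧ c.keys.Nodup ∧
  (match prev with
   | none => c.items = []
   | some p => p ∈ c.keys ∧ c.getD p 0 = 1 ∧ ∀ q ∈ c.keys, q ≠ p → 2 ≤ c.getD q 0)

lemma pvIncr_keys (c : PySem.Dict String Int) : (pvIncr c).keys = c.keys := by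
  unfold pvIncr
  rw [PySem.Dict.keys_foldl_modify, PySem.Set.update_eq_append_filter]
  have h : (PySem.Set.ofList c.keys).filter (fun y => !PySem.Set.contains c.keys y) = [] := by
    apply List.filter_eq_nil_iff.mpr
    intro a ha
    have : a ∈ c.keys := (PySem.Set.mem_ofList c.keys a).mp ha
    simp [this]
  rw [h, List.append_nil]

lemma pvIncr_getD (c : PySem.Dict String Int) (hnd : c.keys.Nodup) (v : String) (hv : v ∈ c.keys) :
    (pvIncr c).getD v 0 = c.getD v 0 + 1 := by
  unfold pvIncr
  rw [PySem.Dict.getD_foldl_modify_add_one, List.count_eq_one_of_mem hnd hv]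
  norm_num

lemma pv_get?_erase_of_ne (d : PySem.Dict String Int) (p q : String) (h : q ≠ p) :
    (d.erase p).get? q = d.get? q := by
  show Option.map _ (List.find? _ (d.items.filter _)) = Option.map _ (List.find? _ d.items)
  congr 1
  induction d.items with
  | nil => rfl
  | cons x xs ih =>
    rw [List.filter_cons]
    by_cases hx : x.1 = p
    · rw [if_neg (by simp [hx])]
      rw [List.find?_cons_of_neg (by simp [hx]; exact Ne.symm h)]
      exact ih
    · rw [if_pos (by simp [hx]), List.find?_cons, List.find?_cons]
      cases hq : (x.1 == q)
      · simpa only [] using ih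
      · rfl

lemma pv_getD_erase_of_ne (d : PySem.Dict String Int) (p q : String) (h : q ≠ p) :
    (d.erase p).getD q 0 = d.getD q 0 := by
  show ((d.erase p).get? q).getD 0 = (d.get? q).getD 0
  rw [pv_get?_erase_of_ne d p q h]

lemma pv_keys_erase (d : PySem.Dict String Int) (p : String) :
    (d.erase p).keys = d.keys.filter (fun y => !(y == p)) := by
  show (d.items.filter _).map _ = (d.items.map _).filter _
  rw [List.filter_map]
  rfl

-- the key fact: under the invariant, A's min-scan picks exactly B's prev
lemma pv_min_eq_prev (c : PySem.Dict String Int) (p : String)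
    (hp : p ∈ c.keys) (h1 : c.getD p 0 = 1)
    (h2 : ∀ q ∈ c.keys, q ≠ p → 2 ≤ c.getD q 0) :
    PySem.List.min? c.keys (fun k => c.getD k 0) = some p := by
  cases hm : PySem.List.min? c.keys (fun k => c.getD k 0) with
  | none =>
    rw [PySem.List.min?_eq_none_iff] at hm
    rw [hm] at hp; cases hp
  | some m =>
    have hmem := PySem.List.min?_mem hm
    have hmin := PySem.List.min?_isMin hm p hp
    by_cases hmp : m = p
    · rw [hmp]
    · have := h2 m hmem hmp
      rw [h1] at hmin
      omega

lemma pv_size_eq (d : PySem.Dict String Int) : d.size = d.keys.length := by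
  show d.items.length = (d.items.map _).length
  rw [List.length_map]

lemma pv_keys_nil_of_items_nil (d : PySem.Dict String Int) (h : d.items = []) : d.keys = [] := by
  show d.items.map _ = []
  rw [h]
  rfl

-- the common tail of a miss step: insert the fresh url and increment every counter
lemma pv_miss_finish (c1 : PySem.Dict String Int) (s1 : PySem.Set String) (url : String)
    (hk1 : c1.keys = s1) (hnd1 : c1.keys.Nodup) (hu1 : url ∉ c1.keys)
    (hge1 : ∀ q ∈ c1.keys, 1 ≤ c1.getD q 0) :
    pvInv (pvIncr (c1.insert url 0)) (PySem.Set.add s1 url) (some url) := by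
  have hcc1 : c1.contains url = false := by
    cases hcc : c1.contains url
    · rfl
    · exact absurd ((PySem.Dict.contains_iff_mem_keys c1 url).mp hcc) hu1
  have hkeys' : (c1.insert url 0).keys = c1.keys ++ [url] :=
    PySem.Dict.keys_insert_of_not_contains c1 0 hcc1
  have hnd' : (c1.insert url 0).keys.Nodup := by
    rw [hkeys']
    exact List.Nodup.append hnd1 (List.nodup_singleton url)
      (by simpa [List.disjoint_singleton] using hu1)
  have hK : (pvIncr (c1.insert url 0)).keys = c1.keys ++ [url] := by
    rw [pvIncr_keys, hkeys']
  have hadd : PySem.Set.add s1 url = s1 ++ [url] :=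
    PySem.Set.add_of_not_mem (hk1 ▸ hu1)
  refine ⟨by rw [hK, hk1, hadd], by rw [hK, ← hkeys']; exact hnd', ?_, ?_, ?_⟩
  · rw [hK]; simp
  · rw [pvIncr_getD _ hnd' url (by rw [hkeys']; simp), PySem.Dict.getD_insert]
    simp
  · intro q hq hqu
    rw [hK] at hq
    have hqc1 : q ∈ c1.keys := by
      rcases List.mem_append.mp hq with h | h
      · exact h
      · simp at h; exact absurd h hqu
    rw [pvIncr_getD _ hnd' q (by rw [hkeys']; exact List.mem_append_left _ hqc1),
      PySem.Dict.getD_insert, if_neg hqu]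
    have := hge1 q hqc1
    omega

-- one step of each loop: outputs agree and the invariant is maintained
lemma pv_step (cache_size cache_time server_time : Int)
    (c : PySem.Dict String Int) (s : PySem.Set String) (prev : Option String)
    (out : List Int) (url : String) (hinv : pvInv c s prev) :
    ∃ c' s' x, pvStepA cache_size cache_time server_time (c, out) url = (c', out ++ [x]) ∧
      pvStepB cache_size cache_time server_time (s, prev, out) url = (s', some url, out ++ [x]) ∧
      pvInv c' s' (some url) := by
  rcases prev with _ | p
  · -- prev = none: the caches are empty, the step is necessarily a miss with no eviction
    obtain ⟨hkeys, hnd, hitems⟩ := hinv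
    have hknil : c.keys = [] := pv_keys_nil_of_items_nil c hitems
    have hsnil : s = ([] : List String) := by rw [← hkeys, hknil]
    have hc : c.contains url = false := by
      cases hcc : c.contains url
      · rfl
      · have := (PySem.Dict.contains_iff_mem_keys c url).mp hcc
        rw [hknil] at this; cases this
    have hs : PySem.Set.contains s url = false := by rw [hsnil]; rfl
    have hmin : PySem.List.min? c.keys (fun k => c.getD k 0) = none := by
      rw [PySem.List.min?_eq_none_iff]; exact hknil
    refine ⟨pvIncr (c.insert url 0), PySem.Set.add s url, server_time, ?_, ?_, ?_⟩
    · simp only [pvStepA]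
      rw [hc]
      simp only [Bool.false_eq_true, if_false]
      by_cases hfull : ((c.size : Int) = cache_size)
      · rw [if_pos hfull, hmin]
      · rw [if_neg hfull]
    · simp only [pvStepB]
      rw [hs]
      simp only [Bool.false_eq_true, if_false]
      by_cases hfull : (PySem.Set.len s = cache_size)
      · rw [if_pos hfull]
      · rw [if_neg hfull]
    · refine pv_miss_finish c s url hkeys hnd (by rw [hknil]; exact List.not_mem_nil) ?_
      intro q hq; rw [hknil] at hq; cases hq
  · -- prev = some p
    obtain ⟨hkeys, hnd, hpmem, hp1, hge2⟩ := hinv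
    by_cases hmem : url ∈ c.keys
    · -- hit
      have hc : c.contains url = true := (PySem.Dict.contains_iff_mem_keys c url).mpr hmem
      have hs : PySem.Set.contains s url = true := by
        rw [← hkeys]; exact (PySem.Set.contains_iff c.keys url).mpr hmem
      refine ⟨pvIncr (c.insert url 0), s, cache_time, ?_, ?_, ?_⟩
      · simp only [pvStepA]
        rw [hc]
        simp
      · simp only [pvStepB]
        rw [hs]
        simp
      · have hkeys' : (c.insert url 0).keys = c.keys := PySem.Dict.keys_insert_of_contains c 0 hc
        have hK : (pvIncr (c.insert url 0)).keys = c.keys := by rw [pvIncr_keys, hkeys']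
        refine ⟨by rw [hK, hkeys], by rw [hK]; exact hnd, by rw [hK]; exact hmem, ?_, ?_⟩
        · rw [pvIncr_getD _ (hkeys' ▸ hnd) url (hkeys' ▸ hmem), PySem.Dict.getD_insert]
          simp
        · intro q hq hqu
          rw [hK] at hq
          rw [pvIncr_getD _ (hkeys' ▸ hnd) q (hkeys' ▸ hq), PySem.Dict.getD_insert, if_neg hqu]
          by_cases hqp : q = p
          · rw [hqp, hp1]; norm_num
          · have := hge2 q hq hqp; omega
    · -- miss
      have hc : c.contains url = false := by
        cases hcc : c.contains url
        · rfl
        · exact absurd ((PySem.Dict.contains_iff_mem_keys c url).mp hcc) hmem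
      have hs : PySem.Set.contains s url = false := by
        cases hcc : PySem.Set.contains s url
        · rfl
        · exact absurd (hkeys ▸ (PySem.Set.contains_iff s url).mp hcc) hmem
      have hlen : (PySem.Set.len s = cache_size) ↔ ((c.size : Int) = cache_size) := by
        rw [pv_size_eq, hkeys]; rfl
      by_cases hfull : ((c.size : Int) = cache_size)
      · -- eviction: A removes the min-counter key, which is exactly p; B removes prev = p
        have hps : p ∈ s := hkeys ▸ hpmem
        have hck : (c.erase p).keys = PySem.Set.discard s p := by
          rw [pv_keys_erase, hkeys]; rfl
        have hnd1 : (c.erase p).keys.Nodup := by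
          rw [pv_keys_erase]; exact hnd.filter _
        have hu1 : url ∉ (c.erase p).keys := by
          rw [pv_keys_erase]
          exact fun hin => hmem (List.mem_of_mem_filter hin)
        have hge1 : ∀ q ∈ (c.erase p).keys, 1 ≤ (c.erase p).getD q 0 := by
          intro q hq
          rw [pv_keys_erase] at hq
          have hqk : q ∈ c.keys := List.mem_of_mem_filter hq
          have hqp : q ≠ p := by
            have := List.of_mem_filter hq
            simpa using this
          rw [pv_getD_erase_of_ne c p q hqp]
          have := hge2 q hqk hqp
          omega
        refine ⟨pvIncr ((c.erase p).insert url 0), PySem.Set.add (PySem.Set.discard s p) url,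
          server_time, ?_, ?_, pv_miss_finish _ _ _ hck hnd1 hu1 hge1⟩
        · simp only [pvStepA]
          rw [hc]
          simp only [Bool.false_eq_true, if_false]
          rw [if_pos hfull, pv_min_eq_prev c p hpmem hp1 hge2]
        · simp only [pvStepB]
          rw [hs]
          simp only [Bool.false_eq_true, if_false]
          rw [if_pos (hlen.mpr hfull), PySem.Set.remove?_of_mem hps]
          rfl
      · -- no eviction
        have hge1 : ∀ q ∈ c.keys, 1 ≤ c.getD q 0 := by
          intro q hq
          by_cases hqp : q = p
          · rw [hqp, hp1]
          · have := hge2 q hq hqp; omega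
        refine ⟨pvIncr (c.insert url 0), PySem.Set.add s url, server_time, ?_, ?_,
          pv_miss_finish c s url hkeys hnd hmem hge1⟩
        · simp only [pvStepA]
          rw [hc]
          simp only [Bool.false_eq_true, if_false]
          rw [if_neg hfull]
        · simp only [pvStepB]
          rw [hs]
          simp only [Bool.false_eq_true, if_false]
          rw [if_neg (fun h => hfull (hlen.mp h))]

-- the two loops run in lockstep from invariant-linked states
lemma pv_loop (cache_size cache_time server_time : Int) (urls : List String) :
    ∀ (c : PySem.Dict String Int) (s : PySem.Set String) (prev : Option String) (out : List Int),
      pvInv c s prev →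
      (urls.foldl (pvStepA cache_size cache_time server_time) (c, out)).2 =
      (urls.foldl (pvStepB cache_size cache_time server_time) (s, prev, out)).2.2 := by
  induction urls with
  | nil => intro c s prev out _; rfl
  | cons url rest ih =>
    intro c s prev out hinv
    obtain ⟨c', s', x, hA, hB, hinv'⟩ :=
      pv_step cache_size cache_time server_time c s prev out url hinv
    rw [List.foldl_cons, List.foldl_cons, hA, hB]
    exact ih c' s' (some url) (out ++ [x]) hinv'

-- ===== VERDICT (by name: the statement is the Claim_ definition above) =====
theorem dns_resolution_spec : Claim_equal_dns_resolution := by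
  intro cache_size cache_time server_time urls _ _
  show dns_resolution cache_size cache_time server_time urls = _
  unfold dns_resolution dns_resolution_alt
  exact pv_loop cache_size cache_time server_time urls PySem.Dict.empty PySem.Set.empty none []
    ⟨rfl, List.nodup_nil, rfl⟩
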